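-- pv_equiv track=rewrite | github.com/dqnykamp/mathinsight | mitesting/utils.py | replace_intervals
-- ===== SOURCE A (Python) =====
-- def replace_intervals(expression, replace_symmetric=True):
--     """
--     Look for combinations of opening ( or [, comma, and closing ) or ].
--     If find both, them replace with
--     __Interval__(... , left_open===True/False, right_open===True/False).
--
--     With nested combinations of this pattern,
--     only the inner combination is converted to an Interval
--
--     If replace_symmetric=True, then open intervals of form (1,2)
--     and closed intervals of form [1,2] are converted.
--     Otherwise, only half-open intervals are converted,
--     and open/closed intervals are untouched.
--
--     returns
--     - string with __Intervals__()
--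
--     """
--
--     left_inds=[]
--     left_opens=[]
--     n_commas=[]
--     intervals_contained=[]
--     found_combinations=[]
--
--     for (i,char) in enumerate(expression):
--         if char=='(' or char== "[":
--             left_opens.append(char=="(")
--             left_inds.append(i)
--             n_commas.append(0)
--             intervals_contained.append(False)
--         elif char==',':
--             if len(n_commas)>0:
--                 n_commas[-1] += 1
--         elif char==')' or char=="]":
--             if len(left_opens)>0:
--                 found_interval = (n_commas.pop()==1)
--                 interval_inside = intervals_contained.pop()
--                 # only add interval if found command and
--                 # there is no interval contained inside
--                 if found_interval:
--                     if not interval_inside: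
--                         found_combinations.append({
--                             'left_open': left_opens.pop(),
--                             'left_ind': left_inds.pop(),
--                             'right_open': (char==")"), 'right_ind': i})
--                     # record fact that have interval inside parent
--                     if len(intervals_contained) >0:
--                         intervals_contained[-1]=True
--                 else:
--                     left_opens.pop()
--                     left_inds.pop()
--                     if len(intervals_contained) > 0:
--                         # propogate presence of interval to parent
--                         intervals_contained[-1]=interval_inside
--
--     last_ind=0
--     expr_interval=""
--     for interval in found_combinations:
--         left_ind=interval['left_ind']
--         right_ind=interval['right_ind']
--         left_open=interval['left_open']
--         right_open=interval['right_open']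
--
--         if not replace_symmetric and left_open==right_open:
--             continue
--
--         expr_interval += expression[last_ind:left_ind]
--
--         # have to use === to specify keywords since
--         # customized parse_expr converts = to Eq
--         expr_interval += " __Interval__(%s,left_open===%s, right_open===%s)" % \
--                  (expression[left_ind+1:right_ind],
--                   left_open, right_open)
--
--         last_ind=right_ind+1
--     expr_interval += expression[last_ind:]
--
--     return expr_interval
-- ===== SOURCE B (Python) =====
-- def replace_intervals(expression, replace_symmetric=True):
--     """Three staged passes: (1) match brackets with a stack of (open index,
--     direct comma count), collecting the 1-comma pairs in closing order;
--     (2) keep only the innermost such pairs -- a later-closing pair contains an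
--     earlier one exactly when it opens before it, so a running maximum of the
--     opening indices decides it; (3) splice the replacements, reading the
--     open/closed flags straight off the bracket characters."""
--     stack = []   # [open index, direct comma count]
--     pairs = []   # matched pairs with exactly one direct comma, in closing order
--     for i, c in enumerate(expression):
--         if c == '(' or c == '[':
--             stack.append([i, 0])
--         elif c == ',':
--             if stack:
--                 stack[-1][1] += 1
--         elif c == ')' or c == ']':
--             if stack:
--                 l, ncommas = stack.pop()
--                 if ncommas == 1:
--                     pairs.append((l, i))
--
--     inner = []
--     mx = -1
--     for l, r in pairs:
--         if l > mx:
--             inner.append((l, r))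
--             mx = l
--
--     out = []
--     last = 0
--     for l, r in inner:
--         left_open = expression[l] == '('
--         right_open = expression[r] == ')'
--         if not replace_symmetric and left_open == right_open:
--             continue
--         out.append(expression[last:l])
--         out.append(" __Interval__(%s,left_open===%s, right_open===%s)"
--                    % (expression[l + 1:r], left_open, right_open))
--         last = r + 1
--     out.append(expression[last:])
--     return "".join(out)
-- ===== Notes on version B (the rewrite author's own statement) =====
-- stated objective: alternative
-- what changed: B replaces A's single fused scan over four parallel mutable stacks by three staged passes: match brackets with one stack of (open index, direct comma count) collecting the 1-comma pairs, keep only the innermost pairs via a running maximum of opening indices, then splice from a piece list, reading the open/closed flags off the bracket characters.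
-- crash fix: On inputs where, after A skipped popping its position stacks at an interval-containing 1-comma close, a later closer arrives with no aligned frame left, A raises IndexError; B returns the parsed string. — e.g. on replace_intervals("((1,2),3))", true): A raises IndexError, B returns "( __Interval__(1,2,left_open===True, right_open===True),3))"
import Mathlib
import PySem

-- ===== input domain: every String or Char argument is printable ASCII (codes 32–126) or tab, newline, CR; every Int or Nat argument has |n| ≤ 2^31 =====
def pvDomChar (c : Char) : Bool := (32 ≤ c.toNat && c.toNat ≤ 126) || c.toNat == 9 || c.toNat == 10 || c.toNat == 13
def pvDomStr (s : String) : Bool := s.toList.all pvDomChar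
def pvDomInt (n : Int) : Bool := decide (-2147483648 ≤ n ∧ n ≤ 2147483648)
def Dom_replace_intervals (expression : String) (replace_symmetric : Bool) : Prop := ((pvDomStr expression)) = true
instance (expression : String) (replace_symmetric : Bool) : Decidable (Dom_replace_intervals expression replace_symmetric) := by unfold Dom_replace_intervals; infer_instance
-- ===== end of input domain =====

-- B replaces A's fused four-parallel-stack scan by three staged folds (match brackets into
-- 1-comma pairs, keep innermost pairs via a running maximum, then splice); objective: alternative.
-- Pre_ excludes the inputs on which A's desynchronised stacks corrupt the result (see Pre_).


-- ===== PORT A =====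
-- Python's four parallel stacks (append/pop at the END) are kept with the TOP AT THE HEAD;
-- found_combinations keeps Python's append order. Each dict A appends is kept as the tuple
-- (left_open, left_ind, right_open, right_ind), in the dict's key order.
-- `n_commas[-1] += 1` (guarded by `len(n_commas)>0`; no-op on the empty stack):
def aIncTop : List Nat → List Nat
  | [] => []
  | n :: t => (n+1) :: t

-- `intervals_contained[-1] = v` (assignment to the top of a possibly-empty stack):
def aSetTop : List Bool → Bool → List Bool
  | [], _ => []
  | _ :: t, v => v :: t

-- A's `for (i,char) in enumerate(expression)` loop:
def aLoop : List Char → Nat → List Bool → List Nat → List Nat → List Bool →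
    List (Bool × Nat × Bool × Nat) →
    List Bool × List Nat × List Nat × List Bool × List (Bool × Nat × Bool × Nat)
  | [], _, lops, lis, ncs, ics, fnd => (lops, lis, ncs, ics, fnd)
  | c :: cs, i, lops, lis, ncs, ics, fnd =>
    if c == '(' || c == '[' then
      aLoop cs (i+1) ((c == '(') :: lops) (i :: lis) (0 :: ncs) (false :: ics) fnd
    else if c == ',' then
      aLoop cs (i+1) lops lis (aIncTop ncs) ics fnd
    else if c == ')' || c == ']' then
      match lops, lis, ncs, ics with
      | [], lis, ncs, ics => aLoop cs (i+1) [] lis ncs ics fnd  -- len(left_opens)==0: closer ignored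
      | lop :: lopt, lind :: lit, n :: nt, b :: bt =>
        if n == 1 then
          if !b then
            -- emit and pop the left stacks
            aLoop cs (i+1) lopt lit nt (aSetTop bt true)
              (fnd ++ [(lop, lind, c == ')', i)])
          else
            -- Python does NOT pop left_opens/left_inds here (the stacks desynchronize)
            aLoop cs (i+1) (lop :: lopt) (lind :: lit) nt (aSetTop bt true) fnd
        else
          aLoop cs (i+1) lopt lit nt (aSetTop bt b) fnd
      -- in the remaining cases Python raises IndexError (desynced stacks); outside Pre_
      | _ :: _, [], ncs, ics => (lops, lis, ncs, ics, fnd)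
      | _ :: _, _ :: _, [], ics => (lops, lis, ncs, ics, fnd)
      | _ :: _, _ :: _, _ :: _, [] => (lops, lis, ncs, ics, fnd)
    else
      aLoop cs (i+1) lops lis ncs ics fnd

-- A's second loop over found_combinations, with (last_ind, expr_interval) as accumulator:
def aSplice : List (Bool × Nat × Bool × Nat) → Bool → List Char → Nat → List Char → List Char
  | [], _, s, lastInd, acc => acc ++ PySem.List.slice s (some (lastInd : Int)) none
  | (lo, l, ro, r) :: t, rs, s, lastInd, acc =>
    if !rs && (lo == ro) then aSplice t rs s lastInd acc
    else
      aSplice t rs s (r+1)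
        (acc ++ PySem.List.slice s (some (lastInd : Int)) (some (l : Int)) ++
          (" __Interval__(".toList ++ PySem.List.slice s (some ((l : Int) + 1)) (some (r : Int)) ++
           ",left_open===".toList ++ (if lo then "True" else "False").toList ++
           ", right_open===".toList ++ (if ro then "True" else "False").toList ++ ")".toList))

def replace_intervals (expression : String) (replace_symmetric : Bool) : String :=
  String.mk (aSplice ((aLoop expression.toList 0 [] [] [] [] []).2.2.2.2)
    replace_symmetric expression.toList 0 [])

-- ===== PORT B =====
-- Source B's three for-loops become three folds. Pass 1: `for i, c in enumerate(expression)` with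
-- mutable (stack, pairs) — state (i, stack, pairs), stack top at the head. Pass 2: the running
-- maximum filter over pairs — state (inner, mx). Pass 3: the splice — state (out, last);
-- "".join(out) is List.flatten. expression[l] / expression[r] (always in range for pairs the
-- scan produced) are PySem.List.pyGet?, compared against the literal bracket characters.
def replace_intervals_alt (expression : String) (replace_symmetric : Bool) : String :=
  let s := expression.toList
  let scan := s.foldl (fun (st : Nat × List (Nat × Nat) × List (Nat × Nat)) c =>
      let i := st.1; let stack := st.2.1; let pairs := st.2.2
      if c == '(' || c == '[' then (i+1, (i, 0) :: stack, pairs)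
      else if c == ',' then
        (i+1, (match stack with | [] => [] | (l, n) :: t => (l, n+1) :: t), pairs)
      else if c == ')' || c == ']' then
        match stack with
        | [] => (i+1, [], pairs)
        | (l, n) :: t => (i+1, t, if n == 1 then pairs ++ [(l, i)] else pairs)
      else (i+1, stack, pairs)) (0, [], [])
  let inner := (scan.2.2.foldl (fun (st : List (Nat × Nat) × Int) p =>
      if (p.1 : Int) > st.2 then (st.1 ++ [p], (p.1 : Int)) else st) ([], -1)).1
  let spliced := inner.foldl (fun (st : List (List Char) × Nat) p =>
      let lo := PySem.List.pyGet? s (p.1 : Int) == some '('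
      let ro := PySem.List.pyGet? s (p.2 : Int) == some ')'
      if !replace_symmetric && lo == ro then st
      else (st.1 ++ [PySem.List.slice s (some (st.2 : Int)) (some (p.1 : Int)),
            " __Interval__(".toList ++ PySem.List.slice s (some ((p.1 : Int) + 1)) (some (p.2 : Int)) ++
            ",left_open===".toList ++ (if lo then "True" else "False").toList ++
            ", right_open===".toList ++ (if ro then "True" else "False").toList ++ ")".toList],
            p.2 + 1)) ([], 0)
  String.mk ((spliced.1 ++ [PySem.List.slice s (some (spliced.2 : Int)) none]).flatten)

-- ===== PRECONDITION & SPEC =====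
-- dScan is an independent scanner over the bracket structure (it builds no output and keeps no
-- positions): frames carry (opening char, direct comma count, A's overwritten last-child flag f,
-- true "contains a closed 1-comma pair" flag h, tainted = opened below a desync).  It returns
-- (D, crash): D is set when A's bookkeeping corrupts the result (a tainted 1-comma pair would be
-- spliced from stale positions, or a 1-comma pair whose f was overwritten to false though h holds
-- would be converted and not suppressed by replace_symmetric); crash is set when a closer arrives
-- with no clean frame left while A's desynced left stacks are nonempty (A raises IndexError).
def dScan : List Char → List (Nat × Bool × Bool × Bool) → Nat → Bool → Bool → Bool × Bool
  | [], _, _, D, cr => (D, cr)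
  | c :: cs, st, eva, D, cr =>
    if c == '(' || c == '[' then dScan cs ((0, false, false, false) :: st) eva D cr
    else if c == ',' then dScan cs (st.modifyHead fun x => (x.1 + 1, x.2)) eva D cr
    else if c == ')' || c == ']' then
      match st with
      | [] => dScan cs [] eva D (cr || decide (0 < eva))
      | (n, f, h, t) :: st =>
        dScan cs
          ((if n == 1 && f then st.map fun x => (x.1, x.2.1, x.2.2.1, true) else st).modifyHead
            fun x => if n == 1 then (x.1, true, true, x.2.2.2) else (x.1, f, x.2.2.1 || h, x.2.2.2))
          (if n == 1 && f then eva + 1 else eva) (D || (n == 1 && !f && (t || h))) cr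
    else dScan cs st eva D cr

-- Pre_ excludes exactly the inputs on which A's bookkeeping at an interval-containing 1-comma
-- close corrupts its state so that no independent re-implementation could match the outcome:
-- A there either raises IndexError, splices stale stack positions into the result, or converts
-- a non-innermost pair whose contained-interval flag was overwritten (B returns the documented
-- innermost-only parse on them, see the cites in claim.json). Harmless desynchronisations, on
-- which A still returns the correct value, stay inside Pre_ and are covered by the proof.
def Pre_replace_intervals (expression : String) (replace_symmetric : Bool) : Prop :=
  dScan expression.toList [] 0 false false = (false, false)
instance (expression : String) (replace_symmetric : Bool) :
    Decidable (Pre_replace_intervals expression replace_symmetric) := by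
  unfold Pre_replace_intervals; infer_instance

def pvWitness_replace_intervals : String × Bool := ("(1,2) + [3,4)", true)

-- On inputs where, after the stacks desynced at an interval-containing 1-comma pair, a later
-- closer arrives with no aligned frame left, A raises IndexError; B returns the parsed string.
def Raises_replace_intervals (expression : String) (replace_symmetric : Bool) : Prop :=
  (dScan expression.toList [] 0 false false).2 = true
instance (expression : String) (replace_symmetric : Bool) :
    Decidable (Raises_replace_intervals expression replace_symmetric) := by
  unfold Raises_replace_intervals; infer_instance

def pvRaiseWitness_replace_intervals : String × Bool := ("((1,2),3))", true)
def pvRaiseWitnessOut_replace_intervals : String :=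
  "( __Interval__(1,2,left_open===True, right_open===True),3))"

def Spec_replace_intervals (expression : String) (replace_symmetric : Bool) (out : String) : Prop :=
  out = replace_intervals_alt expression replace_symmetric
instance (expression : String) (replace_symmetric : Bool) (out : String) :
    Decidable (Spec_replace_intervals expression replace_symmetric out) := by
  unfold Spec_replace_intervals; infer_instance

-- ===== CLAIM (what is proved, stated in full; the proofs are below) =====
def Claim_equal_replace_intervals : Prop := ∀ (expression : String) (replace_symmetric : Bool), Dom_replace_intervals expression replace_symmetric → Pre_replace_intervals expression replace_symmetric → Spec_replace_intervals expression replace_symmetric (replace_intervals expression replace_symmetric)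

def Claim_raises_replace_intervals : Prop := (∀ (expression : String) (replace_symmetric : Bool), Dom_replace_intervals expression replace_symmetric → Raises_replace_intervals expression replace_symmetric → ¬ Pre_replace_intervals expression replace_symmetric) ∧ (Dom_replace_intervals (pvRaiseWitness_replace_intervals.1) (pvRaiseWitness_replace_intervals.2) ∧ Raises_replace_intervals (pvRaiseWitness_replace_intervals.1) (pvRaiseWitness_replace_intervals.2) ∧ replace_intervals_alt (pvRaiseWitness_replace_intervals.1) (pvRaiseWitness_replace_intervals.2) = pvRaiseWitnessOut_replace_intervals)

-- ===== LEMMAS AND PROOFS =====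

-- proof-side recursive twins of B's three folds
def cScan : List Char → Nat → List (Nat × Nat) → List (Nat × Nat) → List (Nat × Nat)
  | [], _, _, pairs => pairs
  | c :: cs, i, st, pairs =>
    if c == '(' || c == '[' then cScan cs (i+1) ((i, 0) :: st) pairs
    else if c == ',' then
      cScan cs (i+1) (match st with | [] => [] | (l, n) :: t => (l, n+1) :: t) pairs
    else if c == ')' || c == ']' then
      match st with
      | [] => cScan cs (i+1) [] pairs
      | (l, n) :: t => cScan cs (i+1) t (if n == 1 then pairs ++ [(l, i)] else pairs)
    else cScan cs (i+1) st pairs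

def cInner : List (Nat × Nat) → Int → List (Nat × Nat)
  | [], _ => []
  | (l, r) :: t, mx => if (l : Int) > mx then (l, r) :: cInner t (l : Int) else cInner t mx

def cSplice : List (Nat × Nat) → Bool → List Char → Nat → List (List Char)
  | [], _, s, last => [PySem.List.slice s (some (last : Int)) none]
  | (l, r) :: t, rs, s, last =>
    let lo := PySem.List.pyGet? s (l : Int) == some '('
    let ro := PySem.List.pyGet? s (r : Int) == some ')'
    if !rs && lo == ro then cSplice t rs s last
    else PySem.List.slice s (some (last : Int)) (some (l : Int)) ::
      (" __Interval__(".toList ++ PySem.List.slice s (some ((l : Int) + 1)) (some (r : Int)) ++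
       ",left_open===".toList ++ (if lo then "True" else "False").toList ++
       ", right_open===".toList ++ (if ro then "True" else "False").toList ++ ")".toList) ::
      cSplice t rs s (r+1)

-- proof-side frames: open position, opening char, direct commas, A's flag f, true flag h, taint
structure PF where
  l : Nat
  oc : Char
  n : Nat
  f : Bool
  h : Bool
  t : Bool
deriving Repr, DecidableEq

def scanF (F : PF) : Nat × Bool × Bool × Bool := (F.n, F.f, F.h, F.t)
def toB (F : PF) : Nat × Nat := (F.l, F.n)
def opF (F : PF) : Bool := F.oc == '('

-- invariant tying the frames (top first) to the string, the emitted pairs and the h flags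
def frInv (s : List Char) (PB : List (Nat × Nat)) : List PF → Nat → Prop
  | [], _ => True
  | F :: rest, ub => F.l < ub ∧ PySem.List.pyGet? s (F.l : Int) = some F.oc ∧
      (F.h = true ↔ ∃ p ∈ PB, F.l < p.1 ∧ p.1 < ub) ∧ (F.f = true → F.h = true) ∧
      (∀ p ∈ PB, p.1 ≠ F.l) ∧ frInv s PB rest F.l

-- A's found-list vs B's pair list, threaded through the running maximum of opening indices:
-- equal entries where the pair is kept, A-dropped entries where not, and extra entries A keeps
-- but the splice skips (replace_symmetric = false, symmetric pair).
def spliceRel (rs : Bool) (s : List Char) :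
    List (Bool × Nat × Bool × Nat) → List (Nat × Nat) → Int → Prop
  | FA, [], _ => FA = []
  | FA, (l, r) :: PB', mx =>
    if (l : Int) > mx then
      ∃ FA', FA = ((PySem.List.pyGet? s (l : Int) == some '('), l,
                   (PySem.List.pyGet? s (r : Int) == some ')'), r) :: FA' ∧
             spliceRel rs s FA' PB' (l : Int)
    else
      spliceRel rs s FA PB' mx

-- running maximum of the opening indices of all pairs
def rmAll : List (Nat × Nat) → Int → Int
  | [], mx => mx
  | p :: t, mx => rmAll t (max mx (p.1 : Int))

theorem dMono : ∀ (cs : List Char) st eva cr,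
    (dScan cs st eva true cr).1 = true := by
  intro cs
  induction cs with
  | nil => intro st eva cr; simp [dScan]
  | cons c cs ih =>
    intro st eva cr
    simp only [dScan]
    split
    · exact ih _ _ _
    · split
      · exact ih _ _ _
      · split
        · cases st with
          | nil => exact ih _ _ _
          | cons hd st' =>
            obtain ⟨n, f, h, t⟩ := hd
            simp only [Bool.true_or]
            exact ih _ _ _
        · exact ih _ _ _

theorem crMono : ∀ (cs : List Char) st eva D,
    (dScan cs st eva D true).2 = true := by
  intro cs
  induction cs with
  | nil => intro st eva D; simp [dScan]
  | cons c cs ih =>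
    intro st eva D
    simp only [dScan]
    split
    · exact ih _ _ _
    · split
      · exact ih _ _ _
      · split
        · cases st with
          | nil => simp only [Bool.true_or]; exact ih _ _ _
          | cons hd st' => obtain ⟨n, f, h, t⟩ := hd; exact ih _ _ _
        · exact ih _ _ _

theorem spliceRel_append (rs : Bool) (s : List Char) : ∀ (PB : List (Nat × Nat))
    (FA : List (Bool × Nat × Bool × Nat)) (mx : Int),
    spliceRel rs s FA PB mx → ∀ (l r : Nat),
    (((l : Int) > rmAll PB mx →
      spliceRel rs s (FA ++ [((PySem.List.pyGet? s (l : Int) == some '('), l,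
        (PySem.List.pyGet? s (r : Int) == some ')'), r)]) (PB ++ [(l, r)]) mx) ∧
     ((l : Int) < rmAll PB mx → spliceRel rs s FA (PB ++ [(l, r)]) mx)) := by
  intro PB
  induction PB with
  | nil =>
    intro FA mx hrel l r
    simp only [spliceRel] at hrel
    subst hrel
    simp only [rmAll, List.nil_append]
    refine ⟨?_, ?_⟩
    · intro hgt
      simp only [spliceRel, if_pos hgt]
      exact ⟨[], rfl, rfl⟩
    · intro hlt
      have hng : ¬ ((l : Int) > mx) := by omega
      simp only [spliceRel, if_neg hng]
  | cons q PB' ih =>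
    intro FA mx hrel l r
    obtain ⟨ql, qr⟩ := q
    simp only [spliceRel] at hrel
    by_cases hq : ((ql : Int) > mx)
    · rw [if_pos hq] at hrel
      obtain ⟨FA', hFA, hrel'⟩ := hrel
      subst hFA
      have hrm : rmAll (((ql, qr)) :: PB') mx = rmAll PB' (ql : Int) := by
        simp only [rmAll]
        congr 1
        omega
      rw [hrm]
      have hih := ih FA' (ql : Int) hrel' l r
      refine ⟨?_, ?_⟩
      · intro hgt
        simp only [List.cons_append, spliceRel, if_pos hq]
        exact ⟨FA' ++ [_], rfl, hih.1 hgt⟩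
      · intro hlt
        simp only [List.cons_append, spliceRel, if_pos hq]
        exact ⟨FA', rfl, hih.2 hlt⟩
    · rw [if_neg hq] at hrel
      have hrm : rmAll (((ql, qr)) :: PB') mx = rmAll PB' mx := by
        simp only [rmAll]
        congr 1
        omega
      rw [hrm]
      have hih := ih FA mx hrel l r
      refine ⟨?_, ?_⟩
      · intro hgt
        simp only [List.cons_append, spliceRel, if_neg hq]
        exact hih.1 hgt
      · intro hlt
        simp only [List.cons_append, spliceRel, if_neg hq]
        exact hih.2 hlt

theorem spliceEq (rs : Bool) (s : List Char) : ∀ (PB : List (Nat × Nat))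
    (FA : List (Bool × Nat × Bool × Nat)) (mx : Int), spliceRel rs s FA PB mx →
    ∀ (last : Nat) (acc : List Char),
    aSplice FA rs s last acc = acc ++ (cSplice (cInner PB mx) rs s last).flatten := by
  intro PB
  induction PB with
  | nil =>
    intro FA mx hrel last acc
    simp only [spliceRel] at hrel
    subst hrel
    simp [aSplice, cInner, cSplice]
  | cons q PB' ih =>
    intro FA mx hrel last acc
    obtain ⟨l, r⟩ := q
    simp only [spliceRel] at hrel
    by_cases hq : ((l : Int) > mx)
    · rw [if_pos hq] at hrel
      obtain ⟨FA', hFA, hrel'⟩ := hrel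
      subst hFA
      simp only [cInner, if_pos hq, cSplice, aSplice]
      split
      · exact ih FA' (l : Int) hrel' last acc
      · rw [ih FA' (l : Int) hrel' (r+1)]
        simp [List.append_assoc]
    · rw [if_neg hq] at hrel
      simp only [cInner, if_neg hq]
      exact ih FA mx hrel last acc


-- small helper lemmas for the main induction
theorem dropLem {s : List Char} {i : Nat} {c : Char} {cs : List Char}
    (h : s.drop i = c :: cs) :
    PySem.List.pyGet? s (i : Int) = some c ∧ s.drop (i+1) = cs := by
  constructor
  · rw [PySem.List.pyGet?_natCast]
    have h0 : (s.drop i)[0]? = some c := by rw [h]; rfl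
    rw [List.getElem?_drop] at h0
    simpa using h0
  · have : s.drop (i+1) = (s.drop i).drop 1 := by
      rw [List.drop_drop]
    rw [this, h]
    rfl

def tnt (F : PF) : PF := { F with t := true }

theorem frInv_set_n (s : List Char) (PB : List (Nat × Nat)) (F : PF) (rest : List PF)
    (ub m : Nat) (h : frInv s PB (F :: rest) ub) :
    frInv s PB ({ F with n := m } :: rest) ub := by
  simpa [frInv] using h

theorem frInv_grow (s : List Char) (PB : List (Nat × Nat)) :
    ∀ (fr : List PF) (i : Nat), (∀ p ∈ PB, p.1 < i) → frInv s PB fr i →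
    frInv s PB fr (i+1) := by
  intro fr i hPB h
  cases fr with
  | nil => trivial
  | cons F rest =>
    obtain ⟨h1, h2, h3, h4, h5, h6⟩ := h
    refine ⟨by omega, h2, ?_, h4, h5, h6⟩
    rw [h3]
    constructor
    · rintro ⟨p, hp, hl, hu⟩; exact ⟨p, hp, hl, by omega⟩
    · rintro ⟨p, hp, hl, _⟩; exact ⟨p, hp, hl, hPB p hp⟩

theorem frInv_addPair (s : List Char) (PB : List (Nat × Nat)) (q r : Nat) :
    ∀ (fr : List PF) (ub : Nat), ub ≤ q → frInv s PB fr ub →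
    frInv s (PB ++ [(q, r)]) fr ub := by
  intro fr
  induction fr with
  | nil => intro ub _ _; trivial
  | cons F rest ih =>
    intro ub hub h
    obtain ⟨h1, h2, h3, h4, h5, h6⟩ := h
    refine ⟨h1, h2, ?_, h4, ?_, ih F.l (by omega) h6⟩
    · rw [h3]
      constructor
      · rintro ⟨p, hp, hl, hu⟩; exact ⟨p, by simp [hp], hl, hu⟩
      · rintro ⟨p, hp, hl, hu⟩
        rcases List.mem_append.mp hp with hp | hp
        · exact ⟨p, hp, hl, hu⟩
        · simp at hp; subst hp; omega
    · intro p hp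
      rcases List.mem_append.mp hp with hp | hp
      · exact h5 p hp
      · simp at hp; subst hp
        simp only
        omega

theorem frInv_map_tnt (s : List Char) (PB : List (Nat × Nat)) :
    ∀ (fr : List PF) (ub : Nat), frInv s PB fr ub → frInv s PB (fr.map tnt) ub := by
  intro fr
  induction fr with
  | nil => intro ub _; trivial
  | cons F rest ih =>
    intro ub h
    obtain ⟨h1, h2, h3, h4, h5, h6⟩ := h
    exact ⟨h1, h2, h3, h4, h5, ih F.l h6⟩

def updP1 : List PF → List PF
  | [] => []
  | G :: gs => { G with f := true, h := true } :: gs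

def updP2 (f0 h0 : Bool) : List PF → List PF
  | [] => []
  | G :: gs => { G with f := f0, h := G.h || h0 } :: gs

theorem map_scanF_tnt (L : List PF) :
    (L.map tnt).map scanF =
      (L.map scanF).map (fun x => (x.1, x.2.1, x.2.2.1, true)) := by
  induction L with
  | nil => rfl
  | cons a L ih => simpa [scanF, tnt] using ih

theorem map_toB_tnt (L : List PF) : (L.map tnt).map toB = L.map toB := by
  induction L with
  | nil => rfl
  | cons a L ih => simpa [toB, tnt] using ih

theorem map_n_tnt (L : List PF) : (L.map tnt).map PF.n = L.map PF.n := by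
  induction L with
  | nil => rfl
  | cons a L ih => simpa [toB, tnt] using ih

theorem map_f_tnt (L : List PF) : (L.map tnt).map PF.f = L.map PF.f := by
  induction L with
  | nil => rfl
  | cons a L ih => simpa [toB, tnt] using ih

-- closing a 1-comma frame F at position i: the new pair (F.l, i) is recorded, the parent's
-- flags both become true
theorem frInv_close1 (s : List Char) (PB : List (Nat × Nat)) (F : PF) (rest : List PF)
    (i : Nat) (h : frInv s PB (F :: rest) i) :
    frInv s (PB ++ [(F.l, i)]) (updP1 rest) (i+1) := by
  obtain ⟨hFl, hFoc, hFh, hFfh, hFdis, hrest⟩ := h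
  cases rest with
  | nil => trivial
  | cons G gs =>
    obtain ⟨hGl, hGoc, hGh, hGfh, hGdis, hgs⟩ := hrest
    refine ⟨by simp; omega, hGoc, ?_, by simp, ?_, ?_⟩
    · simp only [true_iff]
      exact ⟨(F.l, i), by simp, by simpa using hGl, by simp; omega⟩
    · intro p hp
      rcases List.mem_append.mp hp with hp | hp
      · exact hGdis p hp
      · simp at hp; subst hp; simp; omega
    · exact frInv_addPair s PB F.l i gs G.l (by omega) hgs

-- closing a frame F with n ≠ 1: the parent's f is overwritten with F.f, its h absorbs F.h
theorem frInv_close2 (s : List Char) (PB : List (Nat × Nat)) (F : PF) (rest : List PF)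
    (i : Nat) (h : frInv s PB (F :: rest) i) (hPB : ∀ p ∈ PB, p.1 < i) :
    frInv s PB (updP2 F.f F.h rest) (i+1) := by
  obtain ⟨hFl, hFoc, hFh, hFfh, hFdis, hrest⟩ := h
  cases rest with
  | nil => trivial
  | cons G gs =>
    obtain ⟨hGl, hGoc, hGh, hGfh, hGdis, hgs⟩ := hrest
    refine ⟨by simp; omega, hGoc, ?_, ?_, hGdis, hgs⟩
    · simp only [Bool.or_eq_true]
      constructor
      · rintro (hg | hf)
        · obtain ⟨p, hp, hl, hu⟩ := hGh.mp hg
          exact ⟨p, hp, hl, by omega⟩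
        · obtain ⟨p, hp, hl, hu⟩ := hFh.mp hf
          exact ⟨p, hp, by omega, by omega⟩
      · rintro ⟨p, hp, hl, _⟩
        have hpi := hPB p hp
        have hne := hFdis p hp
        by_cases hcmp : p.1 < F.l
        · exact Or.inl (hGh.mpr ⟨p, hp, hl, hcmp⟩)
        · exact Or.inr (hFh.mpr ⟨p, hp, by omega, by omega⟩)
    · intro hf
      simp only [Bool.or_eq_true]
      exact Or.inr (hFfh hf)

theorem rmAll_lt : ∀ (PB : List (Nat × Nat)) (mx x : Int),
    mx < x → (∀ p ∈ PB, (p.1 : Int) < x) → rmAll PB mx < x := by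
  intro PB
  induction PB with
  | nil => intro mx x h _; simpa [rmAll] using h
  | cons p t ih =>
    intro mx x h hall
    simp only [rmAll]
    exact ih _ _ (by have := hall p (by simp); omega) (fun q hq => hall q (by simp [hq]))

theorem rmAll_ge : ∀ (PB : List (Nat × Nat)) (mx : Int) (p : Nat × Nat), p ∈ PB →
    (p.1 : Int) ≤ rmAll PB mx := by
  intro PB
  induction PB with
  | nil => intro mx p hp; simp at hp
  | cons q t ih =>
    intro mx p hp
    simp only [rmAll]
    rcases List.mem_cons.mp hp with h | h
    · subst h
      have : ∀ (t : List (Nat × Nat)) (a b : Int), a ≤ b → a ≤ rmAll t b := by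
        intro t
        induction t with
        | nil => intro a b h; simpa [rmAll] using h
        | cons u v ihv => intro a b h; simp only [rmAll]; exact ihv _ _ (by omega)
      exact this t _ _ (by omega)
    · exact ih _ p h

theorem some_beq_some {a b : Char} : (some a == some b) = (a == b) := by
  by_cases h : a = b <;> simp [h]

def unt (F : PF) : Bool := !F.t
def aOps (fr : List PF) (JO : List Bool) : List Bool := (fr.takeWhile unt).map opF ++ JO
def aIs (fr : List PF) (JI : List Nat) : List Nat := (fr.takeWhile unt).map PF.l ++ JI
def ctT (fr : List PF) : Nat := (fr.filter (fun F => F.t)).length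
def tsort : List PF → Prop
  | [] => True
  | F :: rest => (F.t = true → ∀ G ∈ rest, G.t = true) ∧ tsort rest

theorem ctT_allT : ∀ (L : List PF), (∀ G ∈ L, G.t = true) → ctT L = L.length := by
  intro L
  induction L with
  | nil => intro _; rfl
  | cons F rest ih =>
    intro h
    simp only [ctT, List.filter_cons, h F (by simp), if_pos, List.length_cons]
    have := ih (fun G hG => h G (by simp [hG]))
    simp only [ctT] at this
    omega

theorem tsort_allT : ∀ (L : List PF), (∀ G ∈ L, G.t = true) → tsort L := by
  intro L
  induction L with
  | nil => intro _; trivial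
  | cons F rest ih =>
    intro h
    exact ⟨fun _ G hG => h G (by simp [hG]), ih (fun G hG => h G (by simp [hG]))⟩

theorem tsort_tkw : ∀ (L : List PF), tsort L → (L.takeWhile unt).length + ctT L = L.length := by
  intro L
  induction L with
  | nil => intro _; rfl
  | cons F rest ih =>
    intro h
    cases htf : F.t with
    | false =>
      have : unt F = true := by simp [unt, htf]
      simp only [List.takeWhile_cons, this, if_pos, List.length_cons, ctT, List.filter_cons,
        htf, Bool.false_eq_true, if_false]
      have := ih h.2
      simp only [ctT] at this
      omega
    | true =>
      have hu : unt F = false := by simp [unt, htf]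
      have hall := h.1 htf
      simp only [List.takeWhile_cons, hu, Bool.false_eq_true, if_false, List.length_nil,
        ctT, List.filter_cons, htf, if_pos, List.length_cons]
      have := ctT_allT rest hall
      simp only [ctT] at this
      omega

theorem mainLem (rs : Bool) (s : List Char) :
    ∀ (cs : List Char) (i : Nat) (fr : List PF) (JO : List Bool) (JI : List Nat)
      (eva : Nat) (FA : List (Bool × Nat × Bool × Nat)) (PB : List (Nat × Nat)),
    s.drop i = cs →
    tsort fr →
    JO.length = ctT fr + eva →
    JI.length = ctT fr + eva →
    frInv s PB fr i →
    (∀ p ∈ PB, p.1 < i) →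
    spliceRel rs s FA PB (-1) →
    dScan cs (fr.map scanF) eva false false = (false, false) →
    spliceRel rs s
      ((aLoop cs i (aOps fr JO) (aIs fr JI) (fr.map PF.n) (fr.map PF.f) FA).2.2.2.2)
      (cScan cs i (fr.map toB) PB) (-1) := by
  intro cs
  induction cs with
  | nil =>
    intro i fr JO JI eva FA PB hdrop hts hJO hJI hfr hPB hsr hdc
    simp only [aLoop, cScan]
    exact hsr
  | cons c cs ihm =>
    intro i fr JO JI eva FA PB hdrop hts hJO hJI hfr hPB hsr hdc
    obtain ⟨hget, hdrop'⟩ := dropLem hdrop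
    by_cases h1 : (c == '(' || c == '[') = true
    · -- opener: push a fresh untainted frame
      simp only [aLoop, cScan, if_pos h1]
      simp only [dScan, if_pos h1] at hdc
      have hfr' : frInv s PB ((⟨i, c, 0, false, false, false⟩ : PF) :: fr) (i+1) := by
        refine ⟨Nat.lt_succ_self i, hget, ?_, by simp, ?_, hfr⟩
        · simp only
          constructor
          · intro h; cases h
          · rintro ⟨p, hp, hl, _⟩; have := hPB p hp; omega
        · intro p hp; have := hPB p hp; simp only; omega
      have := ihm (i+1) ((⟨i, c, 0, false, false, false⟩ : PF) :: fr) JO JI eva FA PB hdrop'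
        (by exact ⟨fun h => (Bool.false_ne_true h).elim, hts⟩)
        (by simpa [ctT, List.filter_cons] using hJO)
        (by simpa [ctT, List.filter_cons] using hJI) hfr'
        (fun p hp => by have := hPB p hp; omega)
        hsr
        (by simpa [scanF] using hdc)
      simpa [aOps, aIs, unt, opF, toB, scanF, List.takeWhile_cons] using this
    · have h1f : (c == '(' || c == '[') = false := by simpa using h1
      by_cases h2 : (c == ',') = true
      · -- comma: increment the top frame's count (if any)
        simp only [aLoop, cScan, h1f, if_pos h2, Bool.false_eq_true, if_false]
        simp only [dScan, h1f, if_pos h2, Bool.false_eq_true, if_false] at hdc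
        cases fr with
        | nil =>
          have := ihm (i+1) [] JO JI eva FA PB hdrop' hts hJO hJI (by trivial)
            (fun p hp => by have := hPB p hp; omega)
            hsr (by simpa using hdc)
          simpa [aOps, aIs, aIncTop] using this
        | cons F rest =>
          have hfr2 : frInv s PB (({ F with n := F.n + 1 } : PF) :: rest) (i+1) :=
            frInv_grow s PB _ i hPB (frInv_set_n s PB F rest i (F.n + 1) hfr)
          have := ihm (i+1) (({ F with n := F.n + 1 } : PF) :: rest) JO JI eva FA PB hdrop'
            hts (by cases htf2 : F.t <;> simpa [ctT, List.filter_cons, htf2] using hJO)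
            (by cases htf2 : F.t <;> simpa [ctT, List.filter_cons, htf2] using hJI) hfr2
            (fun p hp => by have := hPB p hp; omega)
            hsr
            (by simpa [scanF, List.modifyHead] using hdc)
          cases htf : F.t <;>
            simpa [aOps, aIs, unt, opF, toB, scanF, List.takeWhile_cons, aIncTop, htf]
              using this
      · have h2f : (c == ',') = false := by simpa using h2
        by_cases h3 : (c == ')' || c == ']') = true
        · -- closer
          simp only [aLoop, cScan, h1f, h2f, if_pos h3, Bool.false_eq_true, if_false]
          simp only [dScan, h1f, h2f, if_pos h3, Bool.false_eq_true, if_false] at hdc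
          cases fr with
          | nil =>
            -- no frames: a stray closer; under Pre_ A's desynced stacks are empty too
            simp only [List.map_nil] at hdc ⊢
            have heva : eva = 0 := by
              by_contra hne
              have hpos : (0 < eva) := Nat.pos_of_ne_zero hne
              have hcr := congrArg Prod.snd hdc
              simp only [hpos, decide_true, Bool.or_true, crMono] at hcr
              cases hcr
            subst heva
            have hJO0 : JO = [] := List.length_eq_zero_iff.mp (by simpa [ctT] using hJO)
            have hJI0 : JI = [] := List.length_eq_zero_iff.mp (by simpa [ctT] using hJI)
            subst hJO0; subst hJI0
            have := ihm (i+1) [] [] [] 0 FA PB hdrop' hts rfl rfl (by trivial)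
              (fun p hp => by have := hPB p hp; omega)
              hsr (by simpa using hdc)
            simpa [aOps, aIs] using this
          | cons F rest =>
            cases htf : F.t with
            | false =>
              by_cases hn : (F.n == 1) = true
              · by_cases hf : F.f = true
                · -- β1: desync (a-event) at an untainted frame
                  obtain ⟨hFl, hFoc, hFh, hFfh, hFdis, hrest⟩ := hfr
                  have heq1 : (F.n = 1) := by simpa using hn
                  have hops : aOps (F :: rest) JO = opF F :: aOps rest JO := by
                    simp [aOps, unt, htf]
                  have hais : aIs (F :: rest) JI = F.l :: aIs rest JI := by
                    simp [aIs, unt, htf]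
                  rw [hops, hais]
                  simp only [List.map_cons, hn, if_true, hf, Bool.not_true, Bool.false_eq_true,
                    if_false]
                  have hlt : ((F.l : Nat) : Int) < rmAll PB (-1) := by
                    obtain ⟨p, hp, hl, _⟩ := hFh.mp (hFfh hf)
                    have := rmAll_ge PB (-1) p hp
                    omega
                  have hsr2 : spliceRel rs s FA (PB ++ [(F.l, i)]) (-1) :=
                    (spliceRel_append rs s PB FA (-1) hsr F.l i).2 hlt
                  have hPB2 : ∀ p ∈ PB ++ [(F.l, i)], p.1 < i + 1 := by
                    intro p hp
                    rcases List.mem_append.mp hp with hp | hp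
                    · have := hPB p hp; omega
                    · simp at hp; subst hp; simp; omega
                  have hfr2 : frInv s (PB ++ [(F.l, i)]) ((updP1 rest).map tnt) (i+1) :=
                    frInv_map_tnt s (PB ++ [(F.l, i)]) (updP1 rest) (i+1)
                      (frInv_close1 s PB F rest i ⟨hFl, hFoc, hFh, hFfh, hFdis, hrest⟩)
                  have hall2 : ∀ G ∈ (updP1 rest).map tnt, G.t = true := by
                    intro G hG
                    rcases List.mem_map.mp hG with ⟨G0, _, rfl⟩
                    rfl
                  have hlen2 : ((updP1 rest).map tnt).length = rest.length := by
                    cases rest <;> simp [updP1]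
                  have hJOr : JO.length = ctT rest + eva := by
                    simpa [ctT, List.filter_cons, htf] using hJO
                  have hJIr : JI.length = ctT rest + eva := by
                    simpa [ctT, List.filter_cons, htf] using hJI
                  have htkw := tsort_tkw rest hts.2
                  have hctT2 := ctT_allT _ hall2
                  have hJO2 : (opF F :: aOps rest JO).length =
                      ctT ((updP1 rest).map tnt) + (eva + 1) := by
                    simp only [List.length_cons, aOps, List.length_append, List.length_map]
                    omega
                  have hJI2 : (F.l :: aIs rest JI).length =
                      ctT ((updP1 rest).map tnt) + (eva + 1) := by
                    simp only [List.length_cons, aIs, List.length_append, List.length_map]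
                    omega
                  simp only [List.map_cons, List.modifyHead, scanF, hn, htf, hf, if_true, Bool.false_eq_true,
                    if_false, Bool.false_and, Bool.and_false, Bool.or_false, Bool.false_or,
                    Bool.not_false, Bool.not_true, Bool.true_and, Bool.and_true,
                    Bool.and_self] at hdc
                  cases rest with
                  | nil =>
                    have := ihm (i+1) [] (opF F :: aOps [] JO) (F.l :: aIs [] JI) (eva+1) FA
                      (PB ++ [(F.l, i)]) hdrop' (by trivial)
                      (by simpa [ctT, updP1] using hJO2) (by simpa [ctT, updP1] using hJI2)
                      (by trivial) hPB2 hsr2 (by simpa [updP1] using hdc)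
                    simpa [aOps, aIs, aSetTop, toB, heq1] using this
                  | cons G gs =>
                    have := ihm (i+1) ((updP1 (G :: gs)).map tnt)
                      (opF F :: aOps (G :: gs) JO) (F.l :: aIs (G :: gs) JI) (eva+1) FA
                      (PB ++ [(F.l, i)]) hdrop' (tsort_allT _ hall2)
                      hJO2 hJI2 hfr2 hPB2 hsr2
                      (by simpa [updP1, scanF, tnt, map_scanF_tnt] using hdc)
                    simpa [aOps, aIs, unt, opF, toB, scanF, tnt, aSetTop, heq1, updP1,
                      map_n_tnt, map_f_tnt, map_toB_tnt] using this
                · have hf' : F.f = false := by simpa using hf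
                  by_cases hh : F.h = true
                  · -- β2h: D fires (the 1-comma pair contains an interval), contradiction
                    exfalso
                    simp only [List.map_cons, List.modifyHead, scanF, hn, htf, hf', hh,
                      if_true, Bool.false_eq_true, if_false, Bool.false_and, Bool.and_false,
                      Bool.or_false, Bool.false_or, Bool.not_false, Bool.true_and,
                      Bool.and_true, Bool.or_true, Bool.true_or] at hdc
                    have hx := congrArg Prod.fst hdc
                    simp only [dMono] at hx
                    simp at hx
                  · have hh' : F.h = false := by simpa using hh
                    -- β2: clean innermost emission
                    obtain ⟨hFl, hFoc, hFh, hFfh, hFdis, hrest⟩ := hfr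
                    have heq1 : (F.n = 1) := by simpa using hn
                    have hops : aOps (F :: rest) JO = opF F :: aOps rest JO := by
                      simp [aOps, unt, htf]
                    have hais : aIs (F :: rest) JI = F.l :: aIs rest JI := by
                      simp [aIs, unt, htf]
                    rw [hops, hais]
                    simp only [List.map_cons, hn, if_true, hf', Bool.not_false, if_pos]
                    have hrenl : (PySem.List.pyGet? s ((F.l : Nat) : Int) == some '(') = opF F := by
                      rw [hFoc, some_beq_some]; rfl
                    have hrenr : (PySem.List.pyGet? s ((i : Nat) : Int) == some ')') = (c == ')') := by
                      rw [hget, some_beq_some]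
                    have hgt : ((F.l : Nat) : Int) > rmAll PB (-1) := by
                      have hall : ∀ p ∈ PB, ((p.1 : Nat) : Int) < (F.l : Int) := by
                        intro p hp
                        have h1 := hPB p hp
                        have h2 := hFdis p hp
                        have h3 : ¬ (F.l < p.1 ∧ p.1 < i) := by
                          intro hcon
                          have := hFh.mpr ⟨p, hp, hcon.1, hcon.2⟩
                          rw [hh'] at this
                          cases this
                        have : p.1 ≤ F.l := by omega
                        have : p.1 < F.l := by omega
                        exact_mod_cast this
                      have := rmAll_lt PB (-1) (F.l : Int) (by omega) hall
                      omega
                    have hsr2 : spliceRel rs s (FA ++ [(opF F, F.l, (c == ')'), i)])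
                        (PB ++ [(F.l, i)]) (-1) := by
                      have := (spliceRel_append rs s PB FA (-1) hsr F.l i).1 hgt
                      rwa [hrenl, hrenr] at this
                    have hPB2 : ∀ p ∈ PB ++ [(F.l, i)], p.1 < i + 1 := by
                      intro p hp
                      rcases List.mem_append.mp hp with hp | hp
                      · have := hPB p hp; omega
                      · simp at hp; subst hp; simp; omega
                    have hfr2 := frInv_close1 s PB F rest i
                      ⟨hFl, hFoc, hFh, hFfh, hFdis, hrest⟩
                    simp only [List.map_cons, List.modifyHead, scanF, hn, htf, hf', hh', if_true,
                      Bool.false_eq_true, if_false, Bool.false_and, Bool.and_false,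
                      Bool.or_false, Bool.not_false, Bool.not_true, Bool.or_self] at hdc
                    cases rest with
                    | nil =>
                      have := ihm (i+1) [] JO JI eva (FA ++ [(opF F, F.l, (c == ')'), i)])
                        (PB ++ [(F.l, i)]) hdrop' (by trivial)
                        (by simpa [ctT, List.filter_cons, htf] using hJO)
                        (by simpa [ctT, List.filter_cons, htf] using hJI)
                        (by trivial) hPB2 hsr2 (by simpa using hdc)
                      simpa [aOps, aIs, aSetTop, toB, heq1] using this
                    | cons G gs =>
                      have hts2 : tsort (({ G with f := true, h := true } : PF) :: gs) :=
                        ⟨fun h => hts.2.1 h, hts.2.2⟩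
                      cases hgt2 : G.t with
                      | false =>
                        have := ihm (i+1) (({ G with f := true, h := true } : PF) :: gs)
                          JO JI eva (FA ++ [(opF F, F.l, (c == ')'), i)]) (PB ++ [(F.l, i)])
                          hdrop' hts2
                          (by simpa [ctT, List.filter_cons, htf, hgt2] using hJO)
                          (by simpa [ctT, List.filter_cons, htf, hgt2] using hJI)
                          (by simpa [updP1] using hfr2) hPB2 hsr2
                          (by simpa [scanF] using hdc)
                        simpa [aOps, aIs, unt, opF, toB, scanF, aSetTop, heq1, hgt2] using this
                      | true =>
                        have := ihm (i+1) (({ G with f := true, h := true } : PF) :: gs)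
                          JO JI eva (FA ++ [(opF F, F.l, (c == ')'), i)]) (PB ++ [(F.l, i)])
                          hdrop' hts2
                          (by simpa [ctT, List.filter_cons, htf, hgt2] using hJO)
                          (by simpa [ctT, List.filter_cons, htf, hgt2] using hJI)
                          (by simpa [updP1] using hfr2) hPB2 hsr2
                          (by simpa [scanF] using hdc)
                        simpa [aOps, aIs, unt, opF, toB, scanF, aSetTop, heq1, hgt2] using this
              · -- β3: close with n ≠ 1, untainted
                have hn' : (F.n == 1) = false := by simpa using hn
                have hne : ¬ (F.n = 1) := by simpa using hn'
                have hops : aOps (F :: rest) JO = opF F :: aOps rest JO := by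
                  simp [aOps, List.takeWhile_cons, unt, htf]
                have hais : aIs (F :: rest) JI = F.l :: aIs rest JI := by
                  simp [aIs, List.takeWhile_cons, unt, htf]
                rw [hops, hais]
                simp only [List.map_cons, hn', Bool.false_eq_true, if_false]
                simp only [List.map_cons, List.modifyHead, scanF, hn', htf, Bool.false_eq_true, if_false,
                  Bool.false_and, Bool.and_false, Bool.or_false, Bool.false_or,
                  Bool.not_false, Bool.true_and, Bool.and_true] at hdc
                cases rest with
                | nil =>
                  have := ihm (i+1) [] JO JI eva FA PB hdrop' (by trivial)
                    (by simpa [ctT, List.filter_cons, htf] using hJO)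
                    (by simpa [ctT, List.filter_cons, htf] using hJI)
                    (by trivial)
                    (fun p hp => by have := hPB p hp; omega)
                    hsr (by simpa using hdc)
                  simpa [aOps, aIs, aSetTop, toB, hne] using this
                | cons G gs =>
                  have hfr2 := frInv_close2 s PB F (G :: gs) i hfr hPB
                  have hts2 : tsort (({ G with f := F.f, h := G.h || F.h } : PF) :: gs) :=
                    ⟨fun h => hts.2.1 h, hts.2.2⟩
                  cases hgt : G.t with
                  | false =>
                    have := ihm (i+1) (({ G with f := F.f, h := G.h || F.h } : PF) :: gs)
                      JO JI eva FA PB hdrop' hts2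
                      (by simpa [ctT, List.filter_cons, htf, hgt] using hJO)
                      (by simpa [ctT, List.filter_cons, htf, hgt] using hJI)
                      (by simpa [updP2] using hfr2)
                      (fun p hp => by have := hPB p hp; omega)
                      hsr (by simpa [scanF] using hdc)
                    simpa [aOps, aIs, unt, opF, toB, scanF, aSetTop, hne,
                      hgt] using this
                  | true =>
                    have := ihm (i+1) (({ G with f := F.f, h := G.h || F.h } : PF) :: gs)
                      JO JI eva FA PB hdrop' hts2
                      (by simpa [ctT, List.filter_cons, htf, hgt] using hJO)
                      (by simpa [ctT, List.filter_cons, htf, hgt] using hJI)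
                      (by simpa [updP2] using hfr2)
                      (fun p hp => by have := hPB p hp; omega)
                      hsr (by simpa [scanF] using hdc)
                    simpa [aOps, aIs, unt, opF, toB, scanF, aSetTop, hne,
                      hgt] using this
            | true =>
              have hallT : ∀ G ∈ rest, G.t = true := hts.1 htf
              rcases JO with _ | ⟨jo, JO'⟩
              · exfalso; simp [ctT, List.filter_cons, htf] at hJO; omega
              rcases JI with _ | ⟨ji, JI'⟩
              · exfalso; simp [ctT, List.filter_cons, htf] at hJI; omega
              have hJOr : JO'.length = ctT rest + eva := by
                simp only [ctT, List.filter_cons, htf, if_pos, List.length_cons,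
                  List.length_cons] at hJO ⊢
                omega
              have hJIr : JI'.length = ctT rest + eva := by
                simp only [ctT, List.filter_cons, htf, if_pos, List.length_cons,
                  List.length_cons] at hJI ⊢
                omega
              have hops : aOps (F :: rest) (jo :: JO') = jo :: JO' := by
                simp [aOps, unt, htf]
              have hais : aIs (F :: rest) (ji :: JI') = ji :: JI' := by
                simp [aIs, unt, htf]
              rw [hops, hais]
              by_cases hn : (F.n == 1) = true
              · have heq1 : (F.n = 1) := by simpa using hn
                by_cases hf : F.f = true
                · -- β1': a-event at a tainted frame
                  obtain ⟨hFl, hFoc, hFh, hFfh, hFdis, hrest⟩ := hfr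
                  simp only [List.map_cons, hn, if_true, hf, Bool.not_true,
                    Bool.false_eq_true, if_false]
                  have hlt : ((F.l : Nat) : Int) < rmAll PB (-1) := by
                    obtain ⟨p, hp, hl, _⟩ := hFh.mp (hFfh hf)
                    have := rmAll_ge PB (-1) p hp
                    omega
                  have hsr2 : spliceRel rs s FA (PB ++ [(F.l, i)]) (-1) :=
                    (spliceRel_append rs s PB FA (-1) hsr F.l i).2 hlt
                  have hPB2 : ∀ p ∈ PB ++ [(F.l, i)], p.1 < i + 1 := by
                    intro p hp
                    rcases List.mem_append.mp hp with hp | hp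
                    · have := hPB p hp; omega
                    · simp at hp; subst hp; simp; omega
                  have hfr2 : frInv s (PB ++ [(F.l, i)]) ((updP1 rest).map tnt) (i+1) :=
                    frInv_map_tnt s (PB ++ [(F.l, i)]) (updP1 rest) (i+1)
                      (frInv_close1 s PB F rest i ⟨hFl, hFoc, hFh, hFfh, hFdis, hrest⟩)
                  have hall2 : ∀ G ∈ (updP1 rest).map tnt, G.t = true := by
                    intro G hG
                    rcases List.mem_map.mp hG with ⟨G0, _, rfl⟩
                    rfl
                  have hlen2 : ((updP1 rest).map tnt).length = rest.length := by
                    cases rest <;> simp [updP1]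
                  have hctT2 := ctT_allT _ hall2
                  have hctTr := ctT_allT rest hallT
                  have hJO2 : (jo :: JO').length = ctT ((updP1 rest).map tnt) + (eva + 1) := by
                    simp only [List.length_cons]
                    omega
                  have hJI2 : (ji :: JI').length = ctT ((updP1 rest).map tnt) + (eva + 1) := by
                    simp only [List.length_cons]
                    omega
                  simp only [List.map_cons, List.modifyHead, scanF, hn, htf, hf, if_true, Bool.false_eq_true,
                    if_false, Bool.false_and, Bool.and_false, Bool.or_false, Bool.false_or,
                    Bool.not_false, Bool.not_true, Bool.true_and, Bool.and_true,
                    Bool.and_self] at hdc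
                  cases rest with
                  | nil =>
                    have := ihm (i+1) [] (jo :: JO') (ji :: JI') (eva+1) FA
                      (PB ++ [(F.l, i)]) hdrop' (by trivial)
                      (by simpa [ctT, updP1] using hJO2) (by simpa [ctT, updP1] using hJI2)
                      (by trivial) hPB2 hsr2 (by simpa [updP1] using hdc)
                    simpa [aOps, aIs, aSetTop, toB, heq1] using this
                  | cons G gs =>
                    have := ihm (i+1) ((updP1 (G :: gs)).map tnt)
                      (jo :: JO') (ji :: JI') (eva+1) FA
                      (PB ++ [(F.l, i)]) hdrop' (tsort_allT _ hall2)
                      hJO2 hJI2 hfr2 hPB2 hsr2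
                      (by simpa [updP1, scanF, tnt, map_scanF_tnt] using hdc)
                    simpa [aOps, aIs, unt, opF, toB, scanF, tnt, aSetTop, heq1, updP1,
                      map_n_tnt, map_f_tnt, map_toB_tnt] using this
                · -- tainted 1-comma close with f = false: D fires, contradiction
                  exfalso
                  have hf' : F.f = false := by simpa using hf
                  simp only [List.map_cons, List.modifyHead, scanF, hn, htf, hf', if_true, Bool.false_eq_true,
                    if_false, Bool.false_and, Bool.and_false, Bool.or_false, Bool.false_or,
                    Bool.not_false, Bool.not_true, Bool.true_and, Bool.and_true,
                    Bool.or_true, Bool.true_or, Bool.and_self] at hdc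
                  have hx := congrArg Prod.fst hdc
                  simp only [dMono] at hx
                  simp at hx
              · -- β3': tainted close with n ≠ 1 pops a junk entry
                have hn' : (F.n == 1) = false := by simpa using hn
                have hne : ¬ (F.n = 1) := by simpa using hn'
                simp only [List.map_cons, hn', Bool.false_eq_true, if_false]
                simp only [List.map_cons, List.modifyHead, scanF, hn', htf, Bool.false_eq_true, if_false,
                  Bool.false_and, Bool.and_false, Bool.or_false, Bool.false_or,
                  Bool.not_false, Bool.true_and, Bool.and_true] at hdc
                have hfr2 := frInv_close2 s PB F rest i hfr hPB
                cases rest with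
                | nil =>
                  have := ihm (i+1) [] JO' JI' eva FA PB hdrop' (by trivial)
                    (by simpa [ctT] using hJOr) (by simpa [ctT] using hJIr)
                    (by trivial)
                    (fun p hp => by have := hPB p hp; omega)
                    hsr (by simpa using hdc)
                  simpa [aOps, aIs, aSetTop, toB, hne] using this
                | cons G gs =>
                  have hGt : G.t = true := hallT G (by simp)
                  have hall2 : ∀ X ∈ (({ G with f := F.f, h := G.h || F.h } : PF) :: gs),
                      X.t = true := by
                    intro X hX
                    rcases List.mem_cons.mp hX with h | h
                    · subst h; simpa using hGt
                    · exact hallT X (by simp [h])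
                  have := ihm (i+1) (({ G with f := F.f, h := G.h || F.h } : PF) :: gs)
                    JO' JI' eva FA PB hdrop' (tsort_allT _ hall2)
                    (by simpa [ctT, List.filter_cons, hGt] using hJOr)
                    (by simpa [ctT, List.filter_cons, hGt] using hJIr)
                    (by simpa [updP2] using hfr2)
                    (fun p hp => by have := hPB p hp; omega)
                    hsr (by simpa [scanF] using hdc)
                  simpa [aOps, aIs, unt, opF, toB, scanF, aSetTop, hne, hGt] using this
        · -- plain character
          have h3f : (c == ')' || c == ']') = false := by simpa using h3
          simp only [aLoop, cScan, h1f, h2f, h3f, Bool.false_eq_true, if_false]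
          simp only [dScan, h1f, h2f, h3f, Bool.false_eq_true, if_false] at hdc
          exact ihm (i+1) fr JO JI eva FA PB hdrop' hts hJO hJI
            (frInv_grow s PB fr i hPB hfr)
            (fun p hp => by have := hPB p hp; omega)
            hsr hdc

-- bridges: B's folds compute the recursive twins
theorem scanBridge : ∀ (cs : List Char) (i : Nat) (st pairs : List (Nat × Nat)),
    (cs.foldl (fun (st : Nat × List (Nat × Nat) × List (Nat × Nat)) c =>
      let i := st.1; let stack := st.2.1; let pairs := st.2.2
      if c == '(' || c == '[' then (i+1, (i, 0) :: stack, pairs)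
      else if c == ',' then
        (i+1, (match stack with | [] => [] | (l, n) :: t => (l, n+1) :: t), pairs)
      else if c == ')' || c == ']' then
        match stack with
        | [] => (i+1, [], pairs)
        | (l, n) :: t => (i+1, t, if n == 1 then pairs ++ [(l, i)] else pairs)
      else (i+1, stack, pairs)) (i, st, pairs)).2.2 = cScan cs i st pairs := by
  intro cs
  induction cs with
  | nil => intro i st pairs; simp [cScan]
  | cons c cs ih =>
    intro i st pairs
    simp only [List.foldl_cons, cScan]
    split
    · exact ih _ _ _
    · split
      · exact ih _ _ _
      · split
        · cases st with
          | nil => exact ih _ _ _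
          | cons hd t => obtain ⟨l, n⟩ := hd; exact ih _ _ _
        · exact ih _ _ _

theorem innerBridge : ∀ (PB acc : List (Nat × Nat)) (mx : Int),
    (PB.foldl (fun (st : List (Nat × Nat) × Int) p =>
      if (p.1 : Int) > st.2 then (st.1 ++ [p], (p.1 : Int)) else st) (acc, mx)).1 =
    acc ++ cInner PB mx := by
  intro PB
  induction PB with
  | nil => intro acc mx; simp [cInner]
  | cons p t ih =>
    intro acc mx
    obtain ⟨l, r⟩ := p
    simp only [List.foldl_cons, cInner]
    split
    · rw [ih]; simp
    · rw [ih]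

theorem spliceBridge (rs : Bool) (s : List Char) : ∀ (inner : List (Nat × Nat))
    (out : List (List Char)) (last : Nat),
    (let st := inner.foldl (fun (st : List (List Char) × Nat) p =>
      let lo := PySem.List.pyGet? s (p.1 : Int) == some '('
      let ro := PySem.List.pyGet? s (p.2 : Int) == some ')'
      if !rs && lo == ro then st
      else (st.1 ++ [PySem.List.slice s (some (st.2 : Int)) (some (p.1 : Int)),
            " __Interval__(".toList ++ PySem.List.slice s (some ((p.1 : Int) + 1)) (some (p.2 : Int)) ++
            ",left_open===".toList ++ (if lo then "True" else "False").toList ++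
            ", right_open===".toList ++ (if ro then "True" else "False").toList ++ ")".toList],
            p.2 + 1)) (out, last)
     st.1 ++ [PySem.List.slice s (some (st.2 : Int)) none]) =
    out ++ cSplice inner rs s last := by
  intro inner
  induction inner with
  | nil => intro out last; simp [cSplice]
  | cons p t ih =>
    intro out last
    obtain ⟨l, r⟩ := p
    simp only [List.foldl_cons, cSplice]
    split
    · exact ih _ _
    · rw [ih]; simp [List.append_assoc]

-- ===== VERDICT (by name: the statement is the Claim_ definition above) =====
theorem replace_intervals_spec : Claim_equal_replace_intervals := by
  intro e rs hdom hpre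
  unfold Spec_replace_intervals
  have hdc : dScan e.toList [] 0 false false = (false, false) := hpre
  have hmain := mainLem rs e.toList e.toList 0 [] [] [] 0 [] []
    (by simp) (by trivial) rfl rfl (by trivial) (by simp) (by trivial) hdc
  simp only [aOps, aIs, List.takeWhile_nil, List.map_nil, List.nil_append] at hmain
  have heq := spliceEq rs e.toList (cScan e.toList 0 [] [])
    ((aLoop e.toList 0 [] [] [] [] []).2.2.2.2) (-1) hmain 0 []
  simp only [List.nil_append] at heq
  unfold replace_intervals replace_intervals_alt
  rw [heq]
  congr 1
  rw [scanBridge e.toList 0 [] []]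
  rw [innerBridge (cScan e.toList 0 [] []) [] (-1)]
  simp only [List.nil_append]
  have hb3 := spliceBridge rs e.toList (cInner (cScan e.toList 0 [] []) (-1)) [] 0
  simp only [List.nil_append] at hb3
  rw [hb3]

theorem replace_intervals_raises : Claim_raises_replace_intervals := by
  unfold Claim_raises_replace_intervals
  refine ⟨?_, by decide⟩
  intro e rs _ h hp
  unfold Raises_replace_intervals at h
  unfold Pre_replace_intervals at hp
  rw [hp] at h
  cases h

-- self-check (reads the verdict above): B's port really returns the stated literal at the raise witness
theorem pvRaiseWitness_ok :
    replace_intervals_alt pvRaiseWitness_replace_intervals.1 pvRaiseWitness_replace_intervals.2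
      = pvRaiseWitnessOut_replace_intervals :=
  replace_intervals_raises.2.2.2
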